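-- pv_equiv track=rewrite | github.com/krell/tg-elysium-xiii | tools/mapmerge/map_helpers.py | get_next_key
-- ===== SOURCE A (Python) =====
-- key_length = 1
--
-- def get_next_key(key):
--     if key == "":
--         return "".join("a" for _ in range(key_length))
--
--     length = len(key)
--     new_key = ""
--     carry = 1
--     for char in key[::-1]:
--         if carry <= 0:
--             new_key = new_key + char
--             continue
--         if char == 'Z':
--             new_key = new_key + 'a'
--             carry += 1
--             length -= 1
--             if length <= 0:
--                 return "OVERFLOW"
--         elif char == 'z':
--             new_key = new_key + 'A'
--         else:
--             new_key = new_key + chr(ord(char) + 1)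
--         if carry > 0:
--             carry -= 1
--     return new_key[::-1]
-- ===== SOURCE B (Python) =====
-- key_length = 1
--
-- def get_next_key(key):
--     if key == "":
--         return "a" * key_length
--     chars = list(key)
--     i = len(chars) - 1
--     while i >= 0 and chars[i] == 'Z':
--         chars[i] = 'a'
--         i -= 1
--     if i < 0:
--         return "OVERFLOW"
--     c = chars[i]
--     chars[i] = 'A' if c == 'z' else chr(ord(c) + 1)
--     return ''.join(chars)
-- ===== Notes on version B (the rewrite author's own statement) =====
-- stated objective: simpler
-- what changed: B drops A's carry counter, length countdown and reversed-string accumulator: it edits a char list in place, scanning from the right only over the run of 'Z's (each set to 'a'), returning OVERFLOW if the index falls below 0, otherwise incrementing the single first non-'Z' character and joining once; it avoids A's per-character string concatenation and full reversal passes.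
import Mathlib
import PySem

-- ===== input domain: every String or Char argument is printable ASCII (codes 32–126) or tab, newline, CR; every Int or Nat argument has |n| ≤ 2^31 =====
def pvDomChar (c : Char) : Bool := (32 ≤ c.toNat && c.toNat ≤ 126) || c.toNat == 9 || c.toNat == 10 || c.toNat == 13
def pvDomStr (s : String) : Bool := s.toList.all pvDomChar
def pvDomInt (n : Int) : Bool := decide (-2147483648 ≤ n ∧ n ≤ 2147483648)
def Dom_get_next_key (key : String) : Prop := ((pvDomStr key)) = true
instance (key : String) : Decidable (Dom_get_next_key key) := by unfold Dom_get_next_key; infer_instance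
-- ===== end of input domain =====

-- B is a simpler decomposition: strip the right-hand run of 'Z's, increment the first
-- non-'Z' char, no carry counter / no output reversal. Equivalence of return values only.

-- ===== PORT A =====
def pv_key_length : Nat := 1

-- the loop of A over key[::-1]: state (new_key reversed-accumulator, carry, length);
-- "return OVERFLOW" is the early exit
def pvALoop : List Char → List Char → Int → Int → String
  | [], new_key, _, _ => String.ofList new_key.reverse
  | c :: rest, new_key, carry, length =>
    if carry ≤ 0 then
      pvALoop rest (new_key ++ [c]) carry length
    else if c = 'Z' then
      let carry' := carry + 1
      let length' := length - 1
      if length' ≤ 0 then "OVERFLOW"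
      else pvALoop rest (new_key ++ ['a'])
             (if carry' > 0 then carry' - 1 else carry') length'
    else
      let nc := if c = 'z' then 'A' else Char.ofNat (c.toNat + 1)  -- chr(ord(char)+1); exact on Dom (codes < 126)
      pvALoop rest (new_key ++ [nc]) (if carry > 0 then carry - 1 else carry) length

def get_next_key (key : String) : String :=
  if key = "" then String.ofList (List.replicate pv_key_length 'a')
  else pvALoop key.toList.reverse [] 1 (key.toList.length : Int)  -- key[::-1]

-- ===== PORT B =====
-- B's right-to-left scan over the run of 'Z's: input is the reversed char list;
-- none = index fell below 0 (all 'Z') = OVERFLOW; result is in reversed order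
def pvBGo : List Char → Option (List Char)
  | [] => none
  | c :: rest =>
    if c = 'Z' then (pvBGo rest).map (fun r => 'a' :: r)
    else some ((if c = 'z' then 'A' else Char.ofNat (c.toNat + 1)) :: rest)

def get_next_key_alt (key : String) : String :=
  if key = "" then String.ofList (List.replicate pv_key_length 'a')
  else
    match pvBGo key.toList.reverse with
    | none => "OVERFLOW"
    | some r => String.ofList r.reverse

-- ===== PRECONDITION & SPEC =====
def Spec_get_next_key (key : String) (out : String) : Prop := out = get_next_key_alt key
instance (key : String) (out : String) : Decidable (Spec_get_next_key key out) := by unfold Spec_get_next_key; infer_instance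

-- ===== CLAIM (what is proved, stated in full; the proofs are below) =====
def Claim_equal_get_next_key : Prop := ∀ (key : String), Dom_get_next_key key → Spec_get_next_key key (get_next_key key)

-- ===== LEMMAS AND PROOFS =====

-- once the carry is absorbed A just copies the remaining chars
lemma pvALoop_carry0 (l : List Char) : ∀ (acc : List Char) (len : Int),
    pvALoop l acc 0 len = String.ofList (acc ++ l).reverse := by
  induction l with
  | nil => intro acc len; simp [pvALoop]
  | cons c rest ih =>
    intro acc len
    simp [pvALoop, ih]

-- the carrying phase of A computes exactly B's scan (length = remaining chars)
lemma pvALoop_carry1 (l : List Char) : ∀ (acc : List Char), l ≠ [] →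
    pvALoop l acc 1 (l.length : Int) =
      (match pvBGo l with
       | none => "OVERFLOW"
       | some r => String.ofList (acc ++ r).reverse) := by
  induction l with
  | nil => intro _ h; exact absurd rfl h
  | cons c rest ih =>
    intro acc _
    by_cases hc : c = 'Z'
    · subst hc
      cases rest with
      | nil => simp [pvALoop, pvBGo]
      | cons d tl =>
        have hlen : ((('Z' :: d :: tl).length : Int) - 1) = ((d :: tl).length : Int) := by
          simp
        have hne : ¬ (((('Z' :: d :: tl).length : Int)) - 1 ≤ 0) := by
          simp
        rw [pvALoop]
        simp only [if_neg (by omega : ¬ (1 : Int) ≤ 0), if_neg hne]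
        rw [show (1 : Int) + 1 - 1 = 1 by omega] -- carry'=2>0 so carry'-1=1
        rw [if_pos (by omega : (1:Int) + 1 > 0)]
        rw [hlen, ih (acc ++ ['a']) (by simp)]
        rw [show pvBGo ('Z' :: d :: tl) = (pvBGo (d :: tl)).map (fun r => 'a' :: r)
          from by simp [pvBGo]]
        cases hg : pvBGo (d :: tl) <;> simp
    · rw [pvALoop]
      simp only [if_neg (by omega : ¬ (1 : Int) ≤ 0), if_neg hc,
        if_pos (by omega : (1:Int) > 0)]
      rw [show (1 : Int) - 1 = 0 by omega, pvALoop_carry0]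
      simp [pvBGo, hc, List.append_assoc]

-- ===== VERDICT (by name: the statement is the Claim_ definition above) =====
theorem get_next_key_spec : Claim_equal_get_next_key := by
  intro key _
  unfold Spec_get_next_key get_next_key get_next_key_alt
  by_cases h : key = ""
  · simp [h]
  · have hnil : key.toList ≠ [] := fun hl => h (String.toList_eq_nil_iff.mp hl)
    have hrev : key.toList.reverse ≠ [] := by simpa using hnil
    rw [if_neg h, if_neg h,
      show ((key.toList.length : Int)) = ((key.toList.reverse.length : Int)) by simp,
      pvALoop_carry1 _ [] hrev]
    cases hg : pvBGo key.toList.reverse <;> simp
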